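-- pv_equiv track=rewrite | github.com/crypticC0der/microovn-operator | microovn/lib/charms/microcluster_token_distributor/v0/token_distributor.py | corroborate
-- ===== SOURCE A (Python) =====
-- from collections import Counter
--
-- def corroborate(items: list, default=""):
--     """Return the most frequent value in a list.
--
--     Iterate through the list finding the most frequent value, while ignoring
--     default. However if no non-default values are found return default.
--
--     NOTE: In the event of two non default values with equal frequency we return
--     the first one, this is not ideal however, it is also not a use case that
--     should come up when using token distributor
--     """
--     if len(items) == 0:
--         return default
--     if len(items) == 1:
--         return items[0]
--     try:
--         return Counter([item for item in items if item != default]).most_common(1)[0][0]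
--     except IndexError:
--         return default
-- ===== SOURCE B (Python) =====
-- def corroborate(items: list, default=""):
--     """Return the most frequent non-default value (ties: earliest first
--     occurrence), in a single pass; default if no non-default value exists."""
--     counts = {}
--     order = {}
--     best = None
--     bestc = 0
--     besto = 0
--     for item in items:
--         if item == default:
--             continue
--         o = order.setdefault(item, len(order))
--         c = counts.get(item, 0) + 1
--         counts[item] = c
--         if c > bestc or (c == bestc and o < besto):
--             best, bestc, besto = item, c, o
--     return default if best is None else best
-- ===== Notes on version B (the rewrite author's own statement) =====
-- stated objective: alternative
-- what changed: B replaces the two length guards plus Counter-then-most_common (build a counter, then stable-sort its items by count) with a single guardless pass that maintains a running best value, its count and its first-occurrence rank, updating on strictly greater count or on an equal count with an earlier first occurrence (which reproduces most_common's insertion-order tie-break).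
import Mathlib
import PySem

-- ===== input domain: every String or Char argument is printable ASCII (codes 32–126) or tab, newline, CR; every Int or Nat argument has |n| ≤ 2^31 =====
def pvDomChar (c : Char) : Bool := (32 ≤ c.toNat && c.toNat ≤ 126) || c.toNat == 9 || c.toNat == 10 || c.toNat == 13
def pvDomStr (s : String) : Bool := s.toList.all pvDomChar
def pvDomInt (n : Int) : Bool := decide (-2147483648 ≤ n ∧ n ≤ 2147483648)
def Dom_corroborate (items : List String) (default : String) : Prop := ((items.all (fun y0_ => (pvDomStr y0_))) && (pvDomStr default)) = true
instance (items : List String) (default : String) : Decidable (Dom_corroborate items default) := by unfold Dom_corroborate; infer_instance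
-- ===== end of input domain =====

-- B replaces the guards + Counter/most_common (count, then stable-sort items by count) with one
-- guardless pass keeping a running best value, its count and its first-occurrence rank (alternative).

-- ===== PORT A =====
def corroborate (items : List String) (default : String) : String :=
  if items.length = 0 then default
  else if items.length = 1 then
    match items with
    | [] => default            -- unreachable: length = 1
    | x :: _ => x              -- items[0]
  else
    -- Counter([item for item in items if item != default]).most_common(1)[0][0];
    -- most_common(1) = first element of the stable sort of the counter's items by count, descending;
    -- the empty case is the IndexError branch, where A returns default.
    match PySem.List.sorted (PySem.Dict.counter (items.filter (fun item => item != default))).items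
            (fun p => p.2) true with
    | [] => default
    | p :: _ => p.1

-- ===== PORT B =====
-- one iteration of B's loop body: state = (counts, order, best, bestc, besto)
def pvBStep (default : String)
    (st : PySem.Dict String Int × PySem.Dict String Int × Option String × Int × Int)
    (item : String) :
    PySem.Dict String Int × PySem.Dict String Int × Option String × Int × Int :=
  match st with
  | (counts, order, best, bestc, besto) =>
    if item == default then (counts, order, best, bestc, besto)
    else
      -- o = order.setdefault(item, len(order))
      let po : Int × PySem.Dict String Int :=
        match order.get? item with
        | some v => (v, order)
        | none => ((order.size : Int), order.insert item (order.size : Int))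
      let c : Int := counts.getD item 0 + 1
      if c > bestc || (c == bestc && po.1 < besto) then
        (counts.insert item c, po.2, some item, c, po.1)
      else
        (counts.insert item c, po.2, best, bestc, besto)

def corroborate_alt (items : List String) (default : String) : String :=
  match (items.foldl (pvBStep default)
          (PySem.Dict.empty, PySem.Dict.empty, none, 0, 0)).2.2.1 with
  | none => default            -- no non-default value seen
  | some b => b

-- ===== PRECONDITION & SPEC =====
def Spec_corroborate (items : List String) (default : String) (out : String) : Prop := out = corroborate_alt items default
instance (items : List String) (default : String) (out : String) : Decidable (Spec_corroborate items default out) := by unfold Spec_corroborate; infer_instance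

-- ===== CLAIM (what is proved, stated in full; the proofs are below) =====
def Claim_equal_corroborate : Prop := ∀ (items : List String) (default : String), Dom_corroborate items default → Spec_corroborate items default (corroborate items default)

-- ===== LEMMAS AND PROOFS =====

-- the running maximum with strictly-greater updates (= head of the stable descending sort)
def pvStep (b : Option (String × Int)) (p : String × Int) : Option (String × Int) :=
  match b with
  | none => some p
  | some q => if q.2 < p.2 then some p else some q

def pvFmax (L : List (String × Int)) : Option (String × Int) := L.foldl pvStep none

-- the items list of B's `order` dict: keys with their first-occurrence ranks
def pvEnum : List String → Nat → List (String × Int)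
  | [], _ => []
  | k :: t, n => (k, (n : Int)) :: pvEnum t (n + 1)

-- b is the first key (in first-occurrence order) of f with maximal count, at rank i
def pvFirstMaxAt (f : List String) (b : String) (i : Nat) : Prop :=
  ∃ ks1 ks2, PySem.Set.ofList f = ks1 ++ b :: ks2 ∧ ks1.length = i ∧
    (∀ k ∈ ks1, List.count k f < List.count b f) ∧
    (∀ k ∈ ks2, List.count k f ≤ List.count b f)

def pvFirstMax (f : List String) (b : String) : Prop := ∃ i, pvFirstMaxAt f b i

-- loop invariant of B, over the filtered prefix f already processed
def pvInv (f : List String)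
    (st : PySem.Dict String Int × PySem.Dict String Int × Option String × Int × Int) : Prop :=
  (∀ k, st.1.getD k 0 = (List.count k f : Int)) ∧
  (st.2.1).items = pvEnum (PySem.Set.ofList f) 0 ∧
  ((st.2.2.1 = none ∧ f = [] ∧ st.2.2.2.1 = 0 ∧ st.2.2.2.2 = 0) ∨
   (∃ (b : String) (i : Nat), st.2.2.1 = some b ∧ st.2.2.2.1 = (List.count b f : Int) ∧
      st.2.2.2.2 = (i : Int) ∧ pvFirstMaxAt f b i))

theorem pvEnum_append (l : List String) (x : String) (n : Nat) :
    pvEnum (l ++ [x]) n = pvEnum l n ++ [(x, ((n + l.length : Nat) : Int))] := by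
  induction l generalizing n with
  | nil => simp [pvEnum]
  | cons a t ih => simp [pvEnum, ih, Nat.add_assoc, Nat.add_comm 1 t.length]

theorem length_pvEnum (l : List String) (n : Nat) : (pvEnum l n).length = l.length := by
  induction l generalizing n with
  | nil => rfl
  | cons a t ih => simp [pvEnum, ih]

theorem find?_pvEnum_of_not_mem (l : List String) (n : Nat) (k : String) (h : k ∉ l) :
    (pvEnum l n).find? (fun p => p.1 == k) = none := by
  induction l generalizing n with
  | nil => rfl
  | cons a t ih =>
    have ha : (a == k) = false := by
      simp only [beq_eq_false_iff_ne, ne_eq]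
      intro hk; exact h (by simp [hk])
    simp [pvEnum, ha, ih _ (fun hm => h (List.mem_cons_of_mem _ hm))]

theorem find?_pvEnum_decomp (p q : List String) (k : String) (n : Nat) (hk : k ∉ p) :
    (pvEnum (p ++ k :: q) n).find? (fun z => z.1 == k) = some (k, ((n + p.length : Nat) : Int)) := by
  induction p generalizing n with
  | nil => simp [pvEnum]
  | cons a t ih =>
    have ha : (a == k) = false := by
      simp only [beq_eq_false_iff_ne, ne_eq]
      intro hx; exact hk (by simp [hx])
    simp only [List.cons_append, pvEnum, List.find?_cons, ha]
    rw [ih _ (fun hm => hk (List.mem_cons_of_mem _ hm))]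
    simp only [List.length_cons]
    congr 3
    omega

theorem pv_ofList_append_singleton (f : List String) (x : String) :
    PySem.Set.ofList (f ++ [x]) =
      if x ∈ PySem.Set.ofList f then PySem.Set.ofList f else PySem.Set.ofList f ++ [x] := by
  simp only [PySem.Set.ofList, List.foldl_append, List.foldl_cons, List.foldl_nil, PySem.Set.add]
  simp

theorem pv_count_append_self (f : List String) (x : String) :
    List.count x (f ++ [x]) = List.count x f + 1 := by
  simp [List.count_append]

theorem pv_count_append_ne (f : List String) (x k : String) (h : k ≠ x) :
    List.count k (f ++ [x]) = List.count k f := by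
  have hx : ¬ (x = k) := fun hh => h hh.symm
  simp [List.count_append, hx]

theorem pv_not_mem_of_nodup_middle (l1 l2 : List String) (a : String)
    (h : (l1 ++ a :: l2).Nodup) : a ∉ l1 ∧ a ∉ l2 := by
  rw [List.nodup_middle, List.nodup_cons] at h
  simpa using h.1

theorem pv_one_le_count (b : String) (f : List String) (h : b ∈ PySem.Set.ofList f) :
    1 ≤ List.count b f :=
  List.count_pos_iff.2 ((PySem.Set.mem_ofList f b).1 h)

theorem pv_ofList_eq_nil (f : List String) (h : PySem.Set.ofList f = []) : f = [] := by
  cases f with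
  | nil => rfl
  | cons a t => exact absurd ((PySem.Set.mem_ofList (a :: t) a).2 (by simp)) (by simp [h])

-- head of the stable descending sort = the strict running maximum
theorem pv_head?_insertBy (x : String × Int) (acc : List (String × Int)) :
    (PySem.List.insertBy (fun a b => decide (b.2 < a.2)) x acc).head? = pvStep acc.head? x := by
  cases acc with
  | nil => rfl
  | cons q t =>
    simp only [PySem.List.insertBy, pvStep, List.head?_cons]
    by_cases h : q.2 < x.2 <;> simp [h]

theorem pv_head?_foldl (L : List (String × Int)) (acc : List (String × Int)) :
    (L.foldl (fun acc x => PySem.List.insertBy (fun a b => decide (b.2 < a.2)) x acc) acc).head?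
      = L.foldl pvStep acc.head? := by
  induction L generalizing acc with
  | nil => rfl
  | cons p t ih => simp only [List.foldl_cons, ih, pv_head?_insertBy]

theorem pv_head?_sorted_rev (L : List (String × Int)) :
    (PySem.List.sorted L (fun p => p.2) true).head? = pvFmax L := by
  rw [PySem.List.sorted_rev_eq_foldl_insertBy]
  simpa using pv_head?_foldl L []

theorem pvFmaxFrom_spec (t : List (String × Int)) (q r : String × Int)
    (h : t.foldl pvStep (some q) = some r) :
    (∀ z ∈ t, z.2 ≤ r.2) ∧ q.2 ≤ r.2 ∧
    (r = q ∨ ∃ pre suf, t = pre ++ r :: suf ∧ q.2 < r.2 ∧ ∀ z ∈ pre, z.2 < r.2) := by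
  induction t generalizing q with
  | nil =>
    simp only [List.foldl_nil, Option.some_inj] at h
    subst h
    exact ⟨by simp, le_refl _, Or.inl rfl⟩
  | cons z t ih =>
    simp only [List.foldl_cons, pvStep] at h
    by_cases hz : q.2 < z.2
    · rw [if_pos hz] at h
      obtain ⟨h1, h2, h3⟩ := ih z h
      refine ⟨?_, le_of_lt (lt_of_lt_of_le hz h2), ?_⟩
      · intro w hw
        rcases List.mem_cons.1 hw with hw | hw
        · exact hw ▸ h2
        · exact h1 w hw
      · rcases h3 with rfl | ⟨pre, suf, rfl, hlt, hpre⟩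
        · exact Or.inr ⟨[], t, rfl, hz, by simp⟩
        · refine Or.inr ⟨z :: pre, suf, rfl, lt_of_lt_of_le hz (le_of_lt hlt), ?_⟩
          intro w hw
          rcases List.mem_cons.1 hw with rfl | hw
          · exact hlt
          · exact hpre w hw
    · rw [if_neg hz] at h
      obtain ⟨h1, h2, h3⟩ := ih q h
      refine ⟨?_, h2, ?_⟩
      · intro w hw
        rcases List.mem_cons.1 hw with rfl | hw
        · exact le_trans (le_of_not_gt hz) h2
        · exact h1 w hw
      · rcases h3 with rfl | ⟨pre, suf, rfl, hlt, hpre⟩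
        · exact Or.inl rfl
        · refine Or.inr ⟨z :: pre, suf, rfl, hlt, ?_⟩
          intro w hw
          rcases List.mem_cons.1 hw with rfl | hw
          · exact lt_of_le_of_lt (le_of_not_gt hz) hlt
          · exact hpre w hw

theorem pvFmax_spec (L : List (String × Int)) (p : String × Int) (h : pvFmax L = some p) :
    ∃ pre suf, L = pre ++ p :: suf ∧ (∀ z ∈ pre, z.2 < p.2) ∧ (∀ z ∈ L, z.2 ≤ p.2) := by
  cases L with
  | nil => simp [pvFmax] at h
  | cons x t =>
    have h' : t.foldl pvStep (some x) = some p := by simpa [pvFmax, pvStep] using h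
    obtain ⟨h1, h2, h3⟩ := pvFmaxFrom_spec t x p h'
    rcases h3 with rfl | ⟨pre, suf, rfl, hlt, hpre⟩
    · exact ⟨[], t, rfl, by simp, by
        intro z hz
        rcases List.mem_cons.1 hz with rfl | hz
        · exact le_refl _
        · exact h1 z hz⟩
    · refine ⟨x :: pre, suf, rfl, ?_, ?_⟩
      · intro z hz
        rcases List.mem_cons.1 hz with rfl | hz
        · exact hlt
        · exact hpre z hz
      · intro z hz
        rcases List.mem_cons.1 hz with rfl | hz
        · exact h2
        · exact h1 z hz

theorem pv_decomp_unique (cnt : String → Nat) :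
    ∀ (ks1 ks1' ks2 ks2' : List String) (b b' : String),
    ks1 ++ b :: ks2 = ks1' ++ b' :: ks2' →
    (∀ k ∈ ks1, cnt k < cnt b) → (∀ k ∈ ks2, cnt k ≤ cnt b) →
    (∀ k ∈ ks1', cnt k < cnt b') → (∀ k ∈ ks2', cnt k ≤ cnt b') → b = b' := by
  intro ks1
  induction ks1 with
  | nil =>
    intro ks1' ks2 ks2' b b' heq h1 h2 h1' h2'
    cases ks1' with
    | nil =>
      rw [List.nil_append, List.nil_append] at heq
      cases heq
      rfl
    | cons c t' =>
      injection heq with hh ht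
      subst hh
      have hb' : b' ∈ ks2 := by rw [ht]; simp
      have := h2 b' hb'
      have := h1' b (by simp)
      omega
  | cons c t ih =>
    intro ks1' ks2 ks2' b b' heq h1 h2 h1' h2'
    cases ks1' with
    | nil =>
      injection heq with hh ht
      subst hh
      have hb : b ∈ ks2' := by rw [← ht]; simp
      have := h2' b hb
      have := h1 c (by simp)
      omega
    | cons c' t' =>
      injection heq with hh ht
      exact ih t' ks2 ks2' b b' ht (fun k hk => h1 k (by simp [hk]))
        h2 (fun k hk => h1' k (by simp [hk])) h2'

theorem pvFirstMax_unique (f : List String) (b b' : String)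
    (h : pvFirstMax f b) (h' : pvFirstMax f b') : b = b' := by
  obtain ⟨i, ks1, ks2, hks, -, h1, h2⟩ := h
  obtain ⟨i', ks1', ks2', hks', -, h1', h2'⟩ := h'
  exact pv_decomp_unique (fun k => List.count k f) ks1 ks1' ks2 ks2' b b'
    (hks ▸ hks') h1 h2 h1' h2'

theorem pvBStep_inv (f : List String) (default : String) (x : String)
    (st : PySem.Dict String Int × PySem.Dict String Int × Option String × Int × Int)
    (hx : ¬ (x == default) = true) (hI : pvInv f st) :
    pvInv (f ++ [x]) (pvBStep default st x) := by
  obtain ⟨counts, order, best, bestc, besto⟩ := st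
  obtain ⟨hc, ho, hb3⟩ := hI
  simp only at hc ho hb3
  have hcount' : ∀ k, (counts.insert x (counts.getD x 0 + 1)).getD k 0
      = (List.count k (f ++ [x]) : Int) := by
    intro k
    by_cases hk : k = x
    · subst hk
      rw [PySem.Dict.getD_insert_self, hc, pv_count_append_self]
      push_cast; ring
    · rw [PySem.Dict.getD_insert_of_ne _ _ _ hk, hc, pv_count_append_ne f x k hk]
  by_cases hmem : x ∈ PySem.Set.ofList f
  · -- x already a key: order unchanged
    have hks' : PySem.Set.ofList (f ++ [x]) = PySem.Set.ofList f := by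
      rw [pv_ofList_append_singleton, if_pos hmem]
    have hnd : (PySem.Set.ofList f).Nodup := PySem.Set.nodup_ofList f
    rcases hb3 with ⟨hbnone, hfnil, hbc, hbo⟩ | ⟨b, i, hbsome, hbc, hbo, ks1, ks2, hdec, hlen, hstrict, hle⟩
    · exact absurd hmem (by simp [hfnil, PySem.Set.ofList, PySem.Set.empty])
    · subst hbsome hbc hbo
      have hx_cases : x ∈ ks1 ∨ x = b ∨ x ∈ ks2 := by
        rw [hdec] at hmem; simpa using hmem
      rcases hx_cases with hx1 | rfl | hx2
      · -- x occurs strictly before the current best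
        obtain ⟨p, q, rfl⟩ := List.append_of_mem hx1
        have hdec' : PySem.Set.ofList f = p ++ x :: (q ++ b :: ks2) := by rw [hdec]; simp
        have hnd2 := hnd
        rw [hdec'] at hnd2
        have hnp := pv_not_mem_of_nodup_middle p (q ++ b :: ks2) x hnd2
        have hxb : x ≠ b := fun e => hnp.2 (by simp [e])
        have hxq : x ∉ q := fun hq => hnp.2 (by simp [hq])
        have hxks2 : x ∉ ks2 := fun hq => hnp.2 (by simp [hq])
        have hfind := find?_pvEnum_decomp p (q ++ b :: ks2) x 0 hnp.1
        have hget : order.get? x = some ((p.length : Nat) : Int) := by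
          simp [PySem.Dict.get?, ho, hdec', hfind]
        have hcv : counts.getD x 0 = ((List.count x f : Nat) : Int) := hc x
        have hlt : List.count x f < List.count b f := hstrict x hx1
        by_cases hceq : List.count x f + 1 = List.count b f
        · -- tie: x's first occurrence is earlier, so it becomes the best
          have h1 : ¬ (((List.count x f : Nat) : Int) + 1 > ((List.count b f : Nat) : Int)) := by
            omega
          have h2 : (((List.count x f : Nat) : Int) + 1 = ((List.count b f : Nat) : Int)) := by
            omega
          have h3 : ((p.length : Nat) : Int) < ((i : Nat) : Int) := by
            rw [← hlen]; simp
          have hstep : pvBStep default (counts, order, some b, ((List.count b f : Nat) : Int), ((i : Nat) : Int)) x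
              = (counts.insert x (counts.getD x 0 + 1), order,
                 some x, counts.getD x 0 + 1, ((p.length : Nat) : Int)) := by
            simp only [pvBStep, hget]
            rw [if_neg hx]
            simp [hcv, h2, h3]
          rw [hstep]
          refine ⟨hcount', by rw [ho, hks'],
            Or.inr ⟨x, p.length, rfl, ?_, rfl, p, q ++ b :: ks2, by rw [hks']; exact hdec', rfl, ?_, ?_⟩⟩
          · rw [hcv, pv_count_append_self]; push_cast; ring
          · intro k hk
            have hkx : k ≠ x := fun e => hnp.1 (e ▸ hk)
            have := hstrict k (by simp [hk])
            rw [pv_count_append_ne f x k hkx, pv_count_append_self]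
            omega
          · intro k hk
            have hkx : k ≠ x := fun e => hnp.2 (e ▸ hk)
            have hkb : List.count k f ≤ List.count b f := by
              rcases List.mem_append.1 hk with hk | hk
              · exact le_of_lt (hstrict k (by simp [hk]))
              · rcases List.mem_cons.1 hk with rfl | hk
                · exact le_refl _
                · exact hle k hk
            rw [pv_count_append_ne f x k hkx, pv_count_append_self]
            omega
        · -- no tie: nothing changes
          have h1 : ¬ (((List.count x f : Nat) : Int) + 1 > ((List.count b f : Nat) : Int)) := by
            omega
          have h2 : ¬ (((List.count x f : Nat) : Int) + 1 = ((List.count b f : Nat) : Int)) := by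
            omega
          have hstep : pvBStep default (counts, order, some b, ((List.count b f : Nat) : Int), ((i : Nat) : Int)) x
              = (counts.insert x (counts.getD x 0 + 1), order,
                 some b, ((List.count b f : Nat) : Int), ((i : Nat) : Int)) := by
            simp only [pvBStep, hget]
            rw [if_neg hx]
            simp [hcv, h1, h2]
          rw [hstep]
          refine ⟨hcount', by rw [ho, hks'],
            Or.inr ⟨b, i, rfl, ?_, rfl, p ++ x :: q, ks2, by rw [hks']; exact hdec, hlen, ?_, ?_⟩⟩
          · rw [pv_count_append_ne f x b (Ne.symm hxb)]
          · intro k hk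
            rw [pv_count_append_ne f x b (Ne.symm hxb)]
            by_cases hkx : k = x
            · subst hkx
              rw [pv_count_append_self]
              omega
            · rw [pv_count_append_ne f x k hkx]
              exact hstrict k hk
          · intro k hk
            have hkx : k ≠ x := fun e => hxks2 (e ▸ hk)
            rw [pv_count_append_ne f x b (Ne.symm hxb), pv_count_append_ne f x k hkx]
            exact hle k hk
      · -- x is the current best: its count grows strictly above bestc
        have hnd2 := hnd
        rw [hdec] at hnd2
        have hnp := pv_not_mem_of_nodup_middle ks1 ks2 x hnd2
        have hfind := find?_pvEnum_decomp ks1 ks2 x 0 hnp.1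
        have hget : order.get? x = some ((ks1.length : Nat) : Int) := by
          simp [PySem.Dict.get?, ho, hdec, hfind]
        have hcv : counts.getD x 0 = ((List.count x f : Nat) : Int) := hc x
        have h1 : (((List.count x f : Nat) : Int) + 1 > ((List.count x f : Nat) : Int)) := by
          omega
        have hstep : pvBStep default (counts, order, some x, ((List.count x f : Nat) : Int), ((i : Nat) : Int)) x
            = (counts.insert x (counts.getD x 0 + 1), order,
               some x, counts.getD x 0 + 1, ((ks1.length : Nat) : Int)) := by
          simp only [pvBStep, hget]
          rw [if_neg hx]
          simp [hcv, h1]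
        rw [hstep]
        refine ⟨hcount', by rw [ho, hks'],
          Or.inr ⟨x, ks1.length, rfl, ?_, rfl, ks1, ks2, by rw [hks']; exact hdec, rfl, ?_, ?_⟩⟩
        · rw [hcv, pv_count_append_self]; push_cast; ring
        · intro k hk
          have hkx : k ≠ x := fun e => hnp.1 (e ▸ hk)
          have := hstrict k hk
          rw [pv_count_append_ne f x k hkx, pv_count_append_self]
          omega
        · intro k hk
          have hkx : k ≠ x := fun e => hnp.2 (e ▸ hk)
          have := hle k hk
          rw [pv_count_append_ne f x k hkx, pv_count_append_self]
          omega
      · -- x occurs after the current best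
        obtain ⟨p, q, rfl⟩ := List.append_of_mem hx2
        have hdec' : PySem.Set.ofList f = (ks1 ++ b :: p) ++ x :: q := by rw [hdec]; simp
        have hnd2 := hnd
        rw [hdec'] at hnd2
        have hnp := pv_not_mem_of_nodup_middle (ks1 ++ b :: p) q x hnd2
        have hxb : x ≠ b := fun e => hnp.1 (by simp [e])
        have hxks1 : x ∉ ks1 := fun hq => hnp.1 (by simp [hq])
        have hxp : x ∉ p := fun hq => hnp.1 (by simp [hq])
        have hfind := find?_pvEnum_decomp (ks1 ++ b :: p) q x 0 hnp.1
        have hget : order.get? x = some (((0 + (ks1 ++ b :: p).length : Nat)) : Int) := by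
          have e : ks1 ++ b :: (p ++ x :: q) = (ks1 ++ b :: p) ++ x :: q := by simp
          simp only [PySem.Dict.get?, ho, hdec, e, hfind, Option.map_some]
        rw [Nat.zero_add] at hget
        have hcv : counts.getD x 0 = ((List.count x f : Nat) : Int) := hc x
        have hlex : List.count x f ≤ List.count b f := hle x (by simp)
        by_cases hgt : List.count b f < List.count x f + 1
        · -- x reaches a strictly larger count and becomes the best
          have h1 : (((List.count x f : Nat) : Int) + 1 > ((List.count b f : Nat) : Int)) := by
            omega
          have hstep : pvBStep default (counts, order, some b, ((List.count b f : Nat) : Int), ((i : Nat) : Int)) x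
              = (counts.insert x (counts.getD x 0 + 1), order,
                 some x, counts.getD x 0 + 1, (((ks1 ++ b :: p).length : Nat) : Int)) := by
            simp only [pvBStep, hget]
            rw [if_neg hx]
            simp [hcv, h1]
          rw [hstep]
          refine ⟨hcount', by rw [ho, hks'],
            Or.inr ⟨x, (ks1 ++ b :: p).length, rfl, ?_, rfl, ks1 ++ b :: p, q, by rw [hks']; exact hdec', rfl, ?_, ?_⟩⟩
          · rw [hcv, pv_count_append_self]; push_cast; ring
          · intro k hk
            have hkx : k ≠ x := fun e => hnp.1 (e ▸ hk)
            have hkb : List.count k f ≤ List.count b f := by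
              rcases List.mem_append.1 hk with hk | hk
              · exact le_of_lt (hstrict k hk)
              · rcases List.mem_cons.1 hk with rfl | hk
                · exact le_refl _
                · exact hle k (by simp [hk])
            rw [pv_count_append_ne f x k hkx, pv_count_append_self]
            omega
          · intro k hk
            have hkx : k ≠ x := fun e => hnp.2 (e ▸ hk)
            have := hle k (by simp [hk])
            rw [pv_count_append_ne f x k hkx, pv_count_append_self]
            omega
        · -- neither a larger count nor an earlier first occurrence: best unchanged
          have h1 : ¬ (((List.count x f : Nat) : Int) + 1 > ((List.count b f : Nat) : Int)) := by
            omega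
          have h3 : ¬ (((ks1.length : Int) + ((p.length : Int) + 1)) < ((i : Nat) : Int)) := by
            rw [← hlen]; omega
          have hstep : pvBStep default (counts, order, some b, ((List.count b f : Nat) : Int), ((i : Nat) : Int)) x
              = (counts.insert x (counts.getD x 0 + 1), order,
                 some b, ((List.count b f : Nat) : Int), ((i : Nat) : Int)) := by
            simp only [pvBStep, hget]
            rw [if_neg hx]
            simp [hcv, h1, h3]
          rw [hstep]
          refine ⟨hcount', by rw [ho, hks'],
            Or.inr ⟨b, i, rfl, ?_, rfl, ks1, p ++ x :: q, by rw [hks']; exact hdec, hlen, ?_, ?_⟩⟩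
          · rw [pv_count_append_ne f x b (Ne.symm hxb)]
          · intro k hk
            have hkx : k ≠ x := fun e => hxks1 (e ▸ hk)
            rw [pv_count_append_ne f x b (Ne.symm hxb), pv_count_append_ne f x k hkx]
            exact hstrict k hk
          · intro k hk
            rw [pv_count_append_ne f x b (Ne.symm hxb)]
            by_cases hkx : k = x
            · subst hkx
              rw [pv_count_append_self]
              omega
            · rw [pv_count_append_ne f x k hkx]
              exact hle k (by simpa using hk)
  · -- x is a fresh key: order gains it at rank |ks|, its count becomes 1
    have hks' : PySem.Set.ofList (f ++ [x]) = PySem.Set.ofList f ++ [x] := by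
      rw [pv_ofList_append_singleton, if_neg hmem]
    have hget : order.get? x = none := by
      simp [PySem.Dict.get?, ho, find?_pvEnum_of_not_mem _ _ _ hmem]
    have hcontains : order.contains x = false := by
      have hg := hget
      simp only [PySem.Dict.get?, Option.map_eq_none_iff, List.find?_eq_none] at hg
      simp only [PySem.Dict.contains, List.any_eq_false]
      intro a hab
      exact by simpa using hg a hab
    have hitems' : (order.insert x (order.size : Int)).items
        = pvEnum (PySem.Set.ofList f ++ [x]) 0 := by
      simp only [PySem.Dict.insert, hcontains, Bool.false_eq_true]
      simp only [pvEnum_append, Nat.zero_add, ho]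
      congr 2
      simp [PySem.Dict.size, ho, length_pvEnum]
    have hcx : List.count x f = 0 := by
      rw [List.count_eq_zero]
      exact fun hm => hmem ((PySem.Set.mem_ofList f x).2 hm)
    rcases hb3 with ⟨hbnone, hfnil, hbc, hbo⟩ | ⟨b, i, hbsome, hbc, hbo, ks1, ks2, hdec, hlen, hstrict, hle⟩
    · -- first non-default item ever: it becomes the best
      subst hbnone hbc hbo hfnil
      have hc0 : counts.getD x 0 = 0 := by simpa using hc x
      have hsz : order.size = 0 := by
        simp [PySem.Dict.size, ho, PySem.Set.ofList, PySem.Set.empty, pvEnum]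
      have hstep : pvBStep default (counts, order, none, 0, 0) x
          = (counts.insert x (counts.getD x 0 + 1), order.insert x (order.size : Int),
             some x, counts.getD x 0 + 1, (order.size : Int)) := by
        simp [pvBStep, hx, hget, hc0]
      rw [hstep]
      refine ⟨hcount', by rw [hitems', ← hks'], Or.inr ⟨x, 0, rfl, ?_, ?_, [], [], ?_, rfl, by simp, by simp⟩⟩
      · rw [hc0, pv_count_append_self]
        simp [hcx]
      · rw [hsz]
      · simpa using hks'
    · -- a fresh key with count 1 never displaces the current best
      subst hbsome hbc hbo
      have hcv : counts.getD x 0 = ((List.count x f : Nat) : Int) := hc x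
      have hbmem : b ∈ PySem.Set.ofList f := by rw [hdec]; simp
      have h1b : 1 ≤ List.count b f := pv_one_le_count b f hbmem
      have hsz : order.size = (PySem.Set.ofList f).length := by
        simp [PySem.Dict.size, ho, length_pvEnum]
      have hilt : i < (PySem.Set.ofList f).length := by
        rw [hdec, ← hlen]; simp
      have hcond : ((counts.getD x 0 + 1 > ((List.count b f : Nat) : Int))
          || ((counts.getD x 0 + 1 == ((List.count b f : Nat) : Int))
              && ((order.size : Int) < ((i : Nat) : Int)))) = false := by
        rw [hcv, hcx, hsz]
        have h1 : ¬ (((0 : Nat) : Int) + 1 > ((List.count b f : Nat) : Int)) := by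
          omega
        have h2 : ¬ ((((PySem.Set.ofList f).length : Nat) : Int) < ((i : Nat) : Int)) := by
          omega
        simp [h2]
        omega
      have hstep : pvBStep default (counts, order, some b, ((List.count b f : Nat) : Int), ((i : Nat) : Int)) x
          = (counts.insert x (counts.getD x 0 + 1), order.insert x (order.size : Int),
             some b, ((List.count b f : Nat) : Int), ((i : Nat) : Int)) := by
        simp only [pvBStep, hget]
        rw [if_neg hx]
        simp only [hcond, Bool.false_eq_true, if_neg, not_false_eq_true]
      rw [hstep]
      have hxnot : ∀ k, k ∈ PySem.Set.ofList f → k ≠ x := fun k hk e => hmem (e ▸ hk)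
      refine ⟨hcount', by rw [hitems', ← hks'],
        Or.inr ⟨b, i, rfl, ?_, rfl, ks1, ks2 ++ [x], ?_, hlen, ?_, ?_⟩⟩
      · rw [pv_count_append_ne f x b (hxnot b hbmem)]
      · rw [hks', hdec]; simp
      · intro k hk
        have hkm : k ∈ PySem.Set.ofList f := by rw [hdec]; simp [hk]
        rw [pv_count_append_ne f x k (hxnot k hkm), pv_count_append_ne f x b (hxnot b hbmem)]
        exact hstrict k hk
      · intro k hk
        rw [pv_count_append_ne f x b (hxnot b hbmem)]
        rcases List.mem_append.1 hk with hk | hk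
        · have hkm : k ∈ PySem.Set.ofList f := by rw [hdec]; simp [hk]
          rw [pv_count_append_ne f x k (hxnot k hkm)]
          exact hle k hk
        · have : k = x := by simpa using hk
          subst this
          rw [pv_count_append_self, hcx]
          omega

theorem pv_loop_inv (l : List String) (default : String) (f : List String)
    (st : PySem.Dict String Int × PySem.Dict String Int × Option String × Int × Int)
    (hI : pvInv f st) :
    pvInv (f ++ l.filter (fun i => i != default)) (l.foldl (pvBStep default) st) := by
  induction l generalizing f st with
  | nil => simpa using hI
  | cons x t ih =>
    by_cases hx : (x == default) = true
    · have : pvBStep default st x = st := by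
        rcases st with ⟨c, o, b, bc, bo⟩; simp [pvBStep, hx]
      simpa [List.filter_cons, bne, hx, this] using ih f st hI
    · have h2 := ih (f ++ [x]) _ (pvBStep_inv f default x st hx hI)
      simpa [List.filter_cons, bne, hx, List.append_assoc] using h2

-- B's result characterized: default on empty filtered input, else the first max
theorem pv_alt_char (items : List String) (default : String) :
    (items.filter (fun i => i != default) = [] ∧ corroborate_alt items default = default) ∨
    (∃ b, pvFirstMax (items.filter (fun i => i != default)) b ∧ corroborate_alt items default = b) := by
  have h0 : pvInv [] ((PySem.Dict.empty, PySem.Dict.empty, none, 0, 0) :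
      PySem.Dict String Int × PySem.Dict String Int × Option String × Int × Int) := by
    refine ⟨fun k => by simp [PySem.Dict.getD, PySem.Dict.get?, PySem.Dict.empty], by rfl, Or.inl ⟨rfl, rfl, rfl, rfl⟩⟩
  have h := pv_loop_inv items default [] _ h0
  rcases h.2.2 with ⟨hbest, hf, _, _⟩ | ⟨b, i, hbest, _, _, hfm⟩
  · left
    refine ⟨by simpa using hf, ?_⟩
    simp only [corroborate_alt, hbest]
  · right
    refine ⟨b, ⟨i, by simpa using hfm⟩, ?_⟩
    simp only [corroborate_alt, hbest]

-- A's result characterized the same way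
theorem pv_a_char (items : List String) (default : String) :
    (items.filter (fun i => i != default) = [] ∧ corroborate items default = default) ∨
    (∃ b, pvFirstMax (items.filter (fun i => i != default)) b ∧ corroborate items default = b) := by
  by_cases h0 : items.length = 0
  · rw [List.length_eq_zero_iff] at h0
    subst h0
    exact Or.inl ⟨rfl, by simp [corroborate]⟩
  by_cases h1 : items.length = 1
  · obtain ⟨x, rfl⟩ := List.length_eq_one_iff.1 h1
    have hc : corroborate [x] default = x := by simp [corroborate]
    by_cases hx : x = default
    · subst hx
      exact Or.inl ⟨by simp, hc⟩
    · refine Or.inr ⟨x, ⟨0, [], [], ?_, rfl, by simp, by simp⟩, hc⟩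
      simp [bne, hx, PySem.Set.ofList, PySem.Set.add, PySem.Set.empty]
  · have hA : corroborate items default =
        match PySem.List.sorted
            (PySem.Dict.counter (items.filter (fun item => item != default))).items
            (fun p => p.2) true with
        | [] => default
        | p :: _ => p.1 := by
      simp only [corroborate, if_neg h0, if_neg h1]
    cases hL : PySem.List.sorted
        (PySem.Dict.counter (items.filter (fun item => item != default))).items
        (fun p => p.2) true with
    | nil =>
      left
      have hit : (PySem.Dict.counter (items.filter (fun item => item != default))).items = [] :=
        (PySem.List.sorted_eq_nil_iff _ _ _).1 hL
      rw [PySem.Dict.items_counter] at hit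
      have hks : PySem.Set.ofList (items.filter (fun item => item != default)) = [] := by
        simpa using hit
      exact ⟨pv_ofList_eq_nil _ hks, by rw [hA, hL]⟩
    | cons p rest =>
      right
      have hhead : pvFmax ((PySem.Set.ofList (items.filter (fun item => item != default))).map
          (fun k => (k, (List.count k (items.filter (fun item => item != default)) : Int))))
          = some p := by
        rw [← PySem.Dict.items_counter, ← pv_head?_sorted_rev, hL]
        rfl
      obtain ⟨pre, suf, hdec, hpre, hall⟩ := pvFmax_spec _ _ hhead
      rw [List.map_eq_append_iff] at hdec
      obtain ⟨ks1, l2, hks, hm1, hm2⟩ := hdec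
      rw [List.map_eq_cons_iff] at hm2
      obtain ⟨b, ks2, rfl, hb, hm3⟩ := hm2
      refine ⟨b, ⟨ks1.length, ks1, ks2, hks, rfl, ?_, ?_⟩, ?_⟩
      · intro k hk
        have hz := hpre _ (hm1 ▸ List.mem_map_of_mem hk)
        rw [← hb] at hz
        simp only at hz
        exact_mod_cast hz
      · intro k hk
        have hmem : (k, (List.count k (items.filter (fun item => item != default)) : Int)) ∈
            (PySem.Set.ofList (items.filter (fun item => item != default))).map
              (fun k => (k, (List.count k (items.filter (fun item => item != default)) : Int))) :=
          List.mem_map_of_mem (by rw [hks]; simp [hk])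
        have hz := hall _ hmem
        rw [← hb] at hz
        simp only at hz
        exact_mod_cast hz
      · rw [hA, hL]
        rw [← hb]

-- ===== VERDICT (by name: the statement is the Claim_ definition above) =====
theorem corroborate_spec : Claim_equal_corroborate := by
  intro items default _
  unfold Spec_corroborate
  rcases pv_a_char items default with ⟨hfa, ha⟩ | ⟨b, hfm, ha⟩ <;>
    rcases pv_alt_char items default with ⟨hfb, hb⟩ | ⟨b', hfm', hb⟩
  · rw [ha, hb]
  · exfalso
    rcases hfm' with ⟨i, ks1, ks2, hks, _, _, _⟩
    rw [hfa] at hks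
    simp [PySem.Set.ofList, PySem.Set.empty] at hks
  · exfalso
    rcases hfm with ⟨i, ks1, ks2, hks, _, _, _⟩
    rw [hfb] at hks
    simp [PySem.Set.ofList, PySem.Set.empty] at hks
  · rw [ha, hb, pvFirstMax_unique _ _ _ hfm hfm']
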